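-- pv_equiv track=rewrite | github.com/AlgorithmOnline/su | 0901_ 자물쇠와열쇠.py | solution
-- ===== SOURCE A (Python) =====
-- def rotate(arr):
--     n=len(arr)
--     rotated=[[0]*n for _ in range(n)]
--     for i in range(n):
--         for j in range(n):
--             rotated[j][n-i-1] =arr[i][j]
--     return rotated
--
-- def check(biglock):
--     leng=len(biglock)//3
--     for i in range(leng,leng*2):
--         for j in range(leng,leng*2):
--             if biglock[i][j]!=1: #합친 부분이 모두 1이 되어야함
--                 return False
--     return True
--
-- def solution(key, lock):
--     n=len(lock)#자물쇠
--     m=len(key)#열쇠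
--     #자물쇠의 크기를 기존의 3배로 변환
--     biglock = [[0]*(n*3) for _ in range(n*3)]
--     #새로운 자물쇠 가운데에 원래 자물쇠 넣기
--     for i in range(n):
--         for j in range(n):
--             biglock[i+n][j+n]=lock[i][j]
--     #열쇠 움직여보기
--     for rotation in range(4):
--         key = rotate(key)#열쇠 회전
--         for h in range(n*2):#자물쇠
--             for w in range(n*2):
--              #자물쇠에 열쇠 끼워넣기
--                 for i in range(m):
--                     for j in range(m):
--                         biglock[h+i][w+j]+=key[i][j]
--                 if check(biglock)==True:
--                     return True
--                  #자물쇠에서 열쇠를 다시 빼기 (원상 복구)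
--                 for i in range(m):
--                     for j in range(m):
--                         biglock[h+i][w+j]-=key[i][j]
--
--     return False
-- ===== SOURCE B (Python) =====
-- def solution(key, lock):
--     n = len(lock)
--     m = len(key)
--     for _ in range(4):
--         key = [[key[m - 1 - j][i] for j in range(m)] for i in range(m)]
--         for h in range(2 * n):
--             for w in range(2 * n):
--                 ok = True
--                 for a in range(n):
--                     for b in range(n):
--                         i = n + a - h
--                         j = n + b - w
--                         v = key[i][j] if 0 <= i < m and 0 <= j < m else 0
--                         if lock[a][b] + v != 1:
--                             ok = False
--                             break
--                     if not ok:
--                         break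
--                 if ok:
--                     return True
--     return False
-- ===== Notes on version B (the rewrite author's own statement) =====
-- stated objective: simpler
-- what changed: B drops the 3n-by-3n padded grid and A's add/check/subtract mutation cycle: for each rotation and offset it verifies the fit directly on the n-by-n lock with index arithmetic (key cell n+a-h, n+b-w when in range), breaking on the first mismatch. (measured much faster: no 9n^2 grid to build/mutate/restore and each offset bails on the first mismatching cell)
-- outside the precondition, e.g. on solution([[0, 0, 0], [0, 0, 0], [0, 0, 0]], [[1]]): A returns True, B returns True; on solution([[1, 1, 1], [1, 1, 1], [1, 1, 1]], [[1]]): A raises IndexError, B returns False; on solution([[1], [1, 0]], [[1, 1], [1, 0]]): A raises IndexError, B raises IndexError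
import Mathlib
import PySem

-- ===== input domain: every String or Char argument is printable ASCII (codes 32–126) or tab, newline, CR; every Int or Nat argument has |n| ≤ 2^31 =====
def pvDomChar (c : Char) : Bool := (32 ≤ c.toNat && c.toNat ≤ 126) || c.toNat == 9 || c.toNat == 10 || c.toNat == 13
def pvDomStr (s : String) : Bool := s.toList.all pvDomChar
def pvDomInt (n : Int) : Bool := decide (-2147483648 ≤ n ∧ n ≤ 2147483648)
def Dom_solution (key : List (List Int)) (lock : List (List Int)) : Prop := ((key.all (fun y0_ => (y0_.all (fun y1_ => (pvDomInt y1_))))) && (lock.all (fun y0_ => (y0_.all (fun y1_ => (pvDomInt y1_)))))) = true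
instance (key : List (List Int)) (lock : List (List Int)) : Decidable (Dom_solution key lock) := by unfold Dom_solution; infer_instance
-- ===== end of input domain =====

-- B replaces A's 3n×3n padded grid with its add/check/subtract mutation cycle by a direct
-- per-offset fit check on the n×n lock via index arithmetic (objective: simpler).
-- Return-value equivalence only; A rebinds (does not mutate) its arguments.

-- ===== PORT A =====
-- 2-d read g[i][j] and read-modify-write g[i][j] := f g[i][j]; exact for the in-range
-- accesses the Python performs on inputs admitted by Pre_ (out of range, Python raises).
def get2d (g : List (List Int)) (i j : Nat) : Int := (g.getD i []).getD j 0

def mod2d (g : List (List Int)) (i j : Nat) (f : Int → Int) : List (List Int) :=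
  g.modify i (fun row => row.modify j f)

-- the common shape of A's three double loops writing g[a+i][b+j] op= src[i][j]
def opFold (op : Int → Int → Int) (src : List (List Int)) (a b I J : Nat)
    (g : List (List Int)) : List (List Int) :=
  (List.range I).foldl (fun g i =>
    (List.range J).foldl (fun g j =>
      mod2d g (a + i) (b + j) (fun x => op x (get2d src i j))) g) g

-- rotate(arr)
def rotateA (arr : List (List Int)) : List (List Int) :=
  (List.range arr.length).foldl (fun g i =>
    (List.range arr.length).foldl (fun g j =>
      mod2d g j (arr.length - i - 1) (fun _ => get2d arr i j)) g)
    (List.replicate arr.length (List.replicate arr.length (0 : Int)))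

-- check(biglock): the early-return double loop as .all
def checkA (biglock : List (List Int)) : Bool :=
  (List.range' (biglock.length / 3) (biglock.length / 3)).all fun i =>
    (List.range' (biglock.length / 3) (biglock.length / 3)).all fun j =>
      get2d biglock i j == 1

-- for w in range(n*2): add key, check (early return), subtract key; biglock is threaded state
def wLoopA (key : List (List Int)) (m h : Nat) :
    List Nat → List (List Int) → Bool × List (List Int)
  | [], g => (false, g)
  | w :: ws, g =>
    let g1 := opFold (fun x v => x + v) key h w m m g
    if checkA g1 then (true, g1)
    else wLoopA key m h ws (opFold (fun x v => x - v) key h w m m g1)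

def hLoopA (key : List (List Int)) (n m : Nat) :
    List Nat → List (List Int) → Bool × List (List Int)
  | [], g => (false, g)
  | h :: hs, g =>
    let r := wLoopA key m h (List.range (n * 2)) g
    if r.1 then r else hLoopA key n m hs r.2

-- for rotation in range(4): key = rotate(key); ...
def rotLoopA (n m : Nat) : Nat → List (List Int) → List (List Int) → Bool
  | 0, _, _ => false
  | fuel + 1, key, g =>
    let key2 := rotateA key
    let r := hLoopA key2 n m (List.range (n * 2)) g
    if r.1 then true else rotLoopA n m fuel key2 r.2

def solution (key : List (List Int)) (lock : List (List Int)) : Bool :=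
  rotLoopA lock.length key.length 4 key
    (opFold (fun _ v => v) lock lock.length lock.length lock.length lock.length
      (List.replicate (lock.length * 3) (List.replicate (lock.length * 3) (0 : Int))))

-- ===== PORT B =====
-- key = [[key[m-1-j][i] for j in range(m)] for i in range(m)]
def rotB (arr : List (List Int)) : List (List Int) :=
  (List.range arr.length).map fun i =>
    (List.range arr.length).map fun j => get2d arr (arr.length - 1 - j) i

-- the fit test for one offset (h, w): every lock cell plus the overlapping key cell equals 1
def fitB (key lock : List (List Int)) (n m h w : Nat) : Bool :=
  (List.range n).all fun a => (List.range n).all fun b =>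
    let i : Int := (n : Int) + a - h
    let j : Int := (n : Int) + b - w
    let v : Int := if 0 ≤ i ∧ i < (m : Int) ∧ 0 ≤ j ∧ j < (m : Int) then
        get2d key i.toNat j.toNat else 0
    get2d lock a b + v == 1

def rotLoopB (lock : List (List Int)) (n m : Nat) : Nat → List (List Int) → Bool
  | 0, _ => false
  | fuel + 1, key =>
    let key2 := rotB key
    if (List.range (2 * n)).any (fun h =>
        (List.range (2 * n)).any fun w => fitB key2 lock n m h w) then true
    else rotLoopB lock n m fuel key2

-- subtracting the key after adding it restores the grid

def solution_alt (key : List (List Int)) (lock : List (List Int)) : Bool :=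
  rotLoopB lock lock.length key.length 4 key

-- ===== PRECONDITION & SPEC =====
-- Pre_ excludes inputs where Python A raises IndexError: ragged grids (a key row shorter
-- than len(key) or a lock row shorter than len(lock) breaks rotate / the centering loop),
-- and keys larger than n+1 on a non-empty lock, where A's 3n-sized padded grid overflows
-- (A only returns there if an early offset already fits — see the claim's cites).
def Pre_solution (key : List (List Int)) (lock : List (List Int)) : Prop :=
  (∀ row ∈ key, key.length ≤ row.length) ∧
  (∀ row ∈ lock, lock.length ≤ row.length) ∧
  (lock.length = 0 ∨ key.length ≤ lock.length + 1)
instance (key : List (List Int)) (lock : List (List Int)) : Decidable (Pre_solution key lock) := by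
  unfold Pre_solution; infer_instance

def pvWitness_solution : List (List Int) × List (List Int) := ([[1]], [[0]])

def Spec_solution (key : List (List Int)) (lock : List (List Int)) (out : Bool) : Prop :=
  out = solution_alt key lock
instance (key : List (List Int)) (lock : List (List Int)) (out : Bool) :
    Decidable (Spec_solution key lock out) := by unfold Spec_solution; infer_instance

-- ===== CLAIM (what is proved, stated in full; the proofs are below) =====
def Claim_equal_solution : Prop := ∀ (key : List (List Int)) (lock : List (List Int)),
  Dom_solution key lock → Pre_solution key lock → Spec_solution key lock (solution key lock)

-- ===== LEMMAS AND PROOFS =====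

lemma getD_modify' {α : Type} (d : α) (l : List α) (j : Nat) (f : α → α) (hj : j < l.length)
    (q : Nat) : (l.modify j f).getD q d = if q = j then f (l.getD q d) else l.getD q d := by
  rw [List.getD_eq_getElem?_getD, List.getElem?_modify, List.getD_eq_getElem?_getD]
  by_cases h : j = q
  · subst h; rw [List.getElem?_eq_getElem hj]; simp
  · simp only [h, if_false]
    rw [if_neg (fun hh => h hh.symm)]
    cases l[q]? <;> rfl

lemma get2d_mod2d (g : List (List Int)) (i j : Nat) (f : Int → Int)
    (hi : i < g.length) (hj : j < (g.getD i []).length) (p q : Nat) :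
    get2d (mod2d g i j f) p q = if p = i ∧ q = j then f (get2d g p q) else get2d g p q := by
  unfold get2d mod2d
  rw [getD_modify' [] g i _ hi p]
  by_cases hip : p = i
  · subst hip
    rw [if_pos rfl, getD_modify' 0 _ j f hj q]
    split_ifs with h1 h2 h2 <;> tauto
  · rw [if_neg hip, if_neg (by tauto)]

lemma rowlen_mod2d (g : List (List Int)) (i j : Nat) (f : Int → Int) (p : Nat) :
    ((mod2d g i j f).getD p []).length = (g.getD p []).length := by
  unfold mod2d
  rw [List.getD_eq_getElem?_getD, List.getD_eq_getElem?_getD, List.getElem?_modify]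
  cases h : g[p]? with
  | none => simp
  | some row => split <;> simp [List.length_modify]

lemma foldl_mod2d_shape {α : Type} (l : List α) (F : List (List Int) → α → List (List Int))
    (hF : ∀ g x, (F g x).length = g.length ∧ ∀ p, ((F g x).getD p []).length = (g.getD p []).length)
    (g : List (List Int)) :
    (l.foldl F g).length = g.length ∧
      ∀ p, ((l.foldl F g).getD p []).length = (g.getD p []).length := by
  induction l generalizing g with
  | nil => exact ⟨rfl, fun _ => rfl⟩
  | cons x xs ih =>
    obtain ⟨h1, h2⟩ := hF g x
    obtain ⟨h3, h4⟩ := ih (F g x)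
    exact ⟨by rw [List.foldl_cons, h3, h1], fun p => by rw [List.foldl_cons, h4 p, h2 p]⟩

lemma shape_rowFold (op : Int → Int → Int) (src : List (List Int)) (a b i : Nat) (J : Nat)
    (g : List (List Int)) :
    ((List.range J).foldl (fun g j =>
        mod2d g (a + i) (b + j) (fun x => op x (get2d src i j))) g).length = g.length ∧
    ∀ p, (((List.range J).foldl (fun g j =>
        mod2d g (a + i) (b + j) (fun x => op x (get2d src i j))) g).getD p []).length
      = (g.getD p []).length :=
  foldl_mod2d_shape _ _ (fun g j => ⟨List.length_modify _ _ _, rowlen_mod2d g _ _ _⟩) g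

lemma shape_opFold (op : Int → Int → Int) (src : List (List Int)) (a b I J : Nat)
    (g : List (List Int)) :
    (opFold op src a b I J g).length = g.length ∧
    ∀ p, ((opFold op src a b I J g).getD p []).length = (g.getD p []).length :=
  foldl_mod2d_shape _ _ (fun g i => shape_rowFold op src a b i J g) g

lemma get2d_rowFold (op : Int → Int → Int) (src : List (List Int)) (a b i : Nat)
    (J : Nat) (g : List (List Int)) (h1 : a + i < g.length)
    (h2 : b + J ≤ (g.getD (a + i) []).length) (p q : Nat) :
    get2d ((List.range J).foldl (fun g j =>
        mod2d g (a + i) (b + j) (fun x => op x (get2d src i j))) g) p q =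
      if p = a + i ∧ b ≤ q ∧ q < b + J then op (get2d g p q) (get2d src i (q - b))
      else get2d g p q := by
  induction J with
  | zero =>
    rw [List.range_zero, List.foldl_nil, if_neg (by omega)]
  | succ J ih =>
    rw [List.range_succ, List.foldl_append, List.foldl_cons, List.foldl_nil]
    have hsh := shape_rowFold op src a b i J g
    rw [get2d_mod2d _ _ _ _ (by rw [hsh.1]; omega) (by rw [hsh.2]; omega) p q]
    rw [ih (by omega)]
    by_cases hp : p = a + i
    · subst hp
      by_cases hq1 : q = b + J
      · subst hq1
        rw [if_pos ⟨rfl, rfl⟩, if_neg (by omega), if_pos (by omega)]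
        congr 1
        congr 1
        omega
      · rw [if_neg (by tauto)]
        by_cases hq2 : b ≤ q ∧ q < b + J
        · rw [if_pos ⟨rfl, hq2.1, hq2.2⟩, if_pos (by omega)]
        · rw [if_neg (by tauto), if_neg (by omega)]
    · rw [if_neg (by tauto), if_neg (by tauto), if_neg (by tauto)]

lemma get2d_opFold (op : Int → Int → Int) (src : List (List Int)) (a b I J : Nat)
    (g : List (List Int)) (h1 : a + I ≤ g.length)
    (h2 : ∀ p, p < g.length → b + J ≤ (g.getD p []).length) (p q : Nat) :
    get2d (opFold op src a b I J g) p q =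
      if a ≤ p ∧ p < a + I ∧ b ≤ q ∧ q < b + J then op (get2d g p q) (get2d src (p - a) (q - b))
      else get2d g p q := by
  induction I with
  | zero =>
    rw [opFold, List.range_zero, List.foldl_nil, if_neg (by omega)]
  | succ I ih =>
    have hsh := shape_opFold op src a b I J g
    have hlen : a + I < (opFold op src a b I J g).length := by rw [hsh.1]; omega
    have step : opFold op src a b (I + 1) J g
        = (List.range J).foldl (fun g j =>
            mod2d g (a + I) (b + j) (fun x => op x (get2d src I j))) (opFold op src a b I J g) := by
      rw [opFold, List.range_succ, List.foldl_append]
      rfl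
    rw [step, get2d_rowFold op src a b I J _ hlen
        (by rw [hsh.2]; exact h2 _ (by omega)) p q]
    rw [ih (by omega)]
    by_cases hp : p = a + I
    · subst hp
      by_cases hq : b ≤ q ∧ q < b + J
      · rw [if_pos ⟨rfl, hq.1, hq.2⟩, if_neg (by omega), if_pos (by omega)]
        congr 2
        omega
      · rw [if_neg (by tauto), if_neg (by omega), if_neg (by omega)]
    · rw [if_neg (by tauto)]
      by_cases hc : a ≤ p ∧ p < a + I ∧ b ≤ q ∧ q < b + J
      · rw [if_pos hc, if_pos (by omega)]
      · rw [if_neg hc, if_neg (by omega)]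

lemma grid_ext (g1 g2 : List (List Int)) (h1 : g1.length = g2.length)
    (h2 : ∀ p, (g1.getD p []).length = (g2.getD p []).length)
    (h3 : ∀ p q, get2d g1 p q = get2d g2 p q) : g1 = g2 := by
  apply List.ext_getElem h1
  intro p hp1 hp2
  have hr1 : g1.getD p [] = g1[p] := by
    rw [List.getD_eq_getElem?_getD, List.getElem?_eq_getElem hp1]; rfl
  have hr2 : g2.getD p [] = g2[p] := by
    rw [List.getD_eq_getElem?_getD, List.getElem?_eq_getElem hp2]; rfl
  apply List.ext_getElem (by rw [← hr1, ← hr2, h2 p])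
  intro q hq1 hq2
  have := h3 p q
  unfold get2d at this
  rw [hr1, hr2] at this
  rwa [List.getD_eq_getElem?_getD, List.getD_eq_getElem?_getD,
    List.getElem?_eq_getElem hq1, List.getElem?_eq_getElem hq2] at this

lemma get2d_replicate (n m : Nat) (p q : Nat) :
    get2d (List.replicate n (List.replicate m (0 : Int))) p q = 0 := by
  unfold get2d
  rw [List.getD_eq_getElem?_getD (l := List.replicate n (List.replicate m (0 : Int))) (i := p),
    List.getElem?_replicate]
  split
  · rw [Option.getD_some, List.getD_eq_getElem?_getD, List.getElem?_replicate]
    split <;> rfl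
  · rfl

lemma rowlen_replicate (n m p : Nat) (hp : p < n) :
    ((List.replicate n (List.replicate m (0 : Int))).getD p []).length = m := by
  rw [List.getD_eq_getElem?_getD, List.getElem?_replicate, if_pos (by simpa using hp)]
  simp

lemma shape_colFold (arr : List (List Int)) (i c : Nat) (J : Nat) (g : List (List Int)) :
    ((List.range J).foldl (fun g j => mod2d g j c (fun _ => get2d arr i j)) g).length = g.length ∧
    ∀ p, (((List.range J).foldl (fun g j =>
        mod2d g j c (fun _ => get2d arr i j)) g).getD p []).length = (g.getD p []).length :=
  foldl_mod2d_shape _ _ (fun g j => ⟨List.length_modify _ _ _, rowlen_mod2d g _ _ _⟩) g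

lemma get2d_colFold (arr : List (List Int)) (i c : Nat) (J : Nat) (g : List (List Int))
    (h1 : J ≤ g.length) (h2 : ∀ p, p < g.length → c < (g.getD p []).length) (p q : Nat) :
    get2d ((List.range J).foldl (fun g j => mod2d g j c (fun _ => get2d arr i j)) g) p q =
      if p < J ∧ q = c then get2d arr i p else get2d g p q := by
  induction J with
  | zero => rw [List.range_zero, List.foldl_nil, if_neg (by omega)]
  | succ J ih =>
    rw [List.range_succ, List.foldl_append, List.foldl_cons, List.foldl_nil]
    have hsh := shape_colFold arr i c J g
    rw [get2d_mod2d _ _ _ _ (by rw [hsh.1]; omega)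
        (by rw [hsh.2]; exact h2 _ (by omega)) p q]
    rw [ih (by omega)]
    by_cases hp : p = J
    · subst hp
      by_cases hq : q = c
      · rw [if_pos ⟨rfl, hq⟩, if_pos (by omega)]
      · rw [if_neg (by tauto), if_neg (by tauto), if_neg (by tauto)]
    · rw [if_neg (by tauto)]
      by_cases hc : p < J ∧ q = c
      · rw [if_pos hc, if_pos (by omega)]
      · rw [if_neg hc, if_neg (by omega)]

lemma shape_rotFold (arr : List (List Int)) (n : Nat) (I : Nat) (g : List (List Int)) :
    ((List.range I).foldl (fun g i => (List.range n).foldl (fun g j =>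
        mod2d g j (n - i - 1) (fun _ => get2d arr i j)) g) g).length = g.length ∧
    ∀ p, (((List.range I).foldl (fun g i => (List.range n).foldl (fun g j =>
        mod2d g j (n - i - 1) (fun _ => get2d arr i j)) g) g).getD p []).length
      = (g.getD p []).length :=
  foldl_mod2d_shape _ _ (fun g i => shape_colFold arr i (n - i - 1) n g) g

lemma get2d_rotFold (arr : List (List Int)) (n : Nat) (I : Nat) (hI : I ≤ n)
    (g : List (List Int)) (h1 : g.length = n)
    (h2 : ∀ p, p < g.length → (g.getD p []).length = n) (p q : Nat) :
    get2d ((List.range I).foldl (fun g i => (List.range n).foldl (fun g j =>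
        mod2d g j (n - i - 1) (fun _ => get2d arr i j)) g) g) p q =
      if p < n ∧ n - I ≤ q ∧ q < n then get2d arr (n - 1 - q) p else get2d g p q := by
  induction I with
  | zero => rw [List.range_zero, List.foldl_nil, if_neg (by omega)]
  | succ I ih =>
    rw [List.range_succ, List.foldl_append, List.foldl_cons, List.foldl_nil]
    have hsh := shape_rotFold arr n I g
    rw [get2d_colFold arr I (n - I - 1) n _ (by omega)
        (fun p hp => by rw [hsh.2]; rw [hsh.1] at hp; rw [h2 p hp]; omega) p q]
    rw [ih (by omega)]
    by_cases hp : p < n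
    · by_cases hq : q = n - I - 1
      · rw [if_pos ⟨hp, hq⟩, if_pos (by omega)]
        have hqi : n - 1 - q = I := by omega
        rw [hqi]
      · by_cases hc : n - I ≤ q ∧ q < n
        · rw [if_neg (by tauto), if_pos ⟨hp, hc.1, hc.2⟩, if_pos (by omega)]
        · rw [if_neg (by tauto), if_neg (by tauto), if_neg (by omega)]
    · rw [if_neg (by tauto), if_neg (by tauto), if_neg (by tauto)]

lemma length_rotateA (arr : List (List Int)) : (rotateA arr).length = arr.length := by
  unfold rotateA
  rw [(shape_rotFold arr arr.length arr.length _).1, List.length_replicate]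

lemma rowlen_rotateA (arr : List (List Int)) (p : Nat) (hp : p < arr.length) :
    ((rotateA arr).getD p []).length = arr.length := by
  unfold rotateA
  rw [(shape_rotFold arr arr.length arr.length _).2, rowlen_replicate _ _ _ hp]

lemma get2d_rotateA (arr : List (List Int)) (p q : Nat) :
    get2d (rotateA arr) p q =
      if p < arr.length ∧ q < arr.length then get2d arr (arr.length - 1 - q) p else 0 := by
  unfold rotateA
  rw [get2d_rotFold arr arr.length arr.length le_rfl _ (List.length_replicate)
    (fun p hp => rowlen_replicate _ _ _ (by simpa using hp)) p q]
  rw [get2d_replicate]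
  by_cases hc : p < arr.length ∧ q < arr.length
  · rw [if_pos ⟨hc.1, by omega, hc.2⟩, if_pos hc]
  · rw [if_neg (by omega), if_neg hc]

lemma length_rotB (arr : List (List Int)) : (rotB arr).length = arr.length := by
  unfold rotB; simp

lemma rowlen_rotB (arr : List (List Int)) (p : Nat) (hp : p < arr.length) :
    ((rotB arr).getD p []).length = arr.length := by
  unfold rotB
  rw [List.getD_eq_getElem?_getD, List.getElem?_map, List.getElem?_range (by simpa using hp)]
  simp

lemma get2d_rotB (arr : List (List Int)) (p q : Nat) :
    get2d (rotB arr) p q =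
      if p < arr.length ∧ q < arr.length then get2d arr (arr.length - 1 - q) p else 0 := by
  unfold get2d rotB
  by_cases hp : p < arr.length
  · rw [List.getD_eq_getElem?_getD (i := p), List.getElem?_map,
      List.getElem?_range (by simpa using hp)]
    simp only [Option.map_some, Option.getD_some]
    by_cases hq : q < arr.length
    · rw [List.getD_eq_getElem?_getD, List.getElem?_map, List.getElem?_range (by simpa using hq)]
      rw [if_pos ⟨hp, hq⟩]
      rfl
    · rw [List.getD_eq_getElem?_getD, List.getElem?_eq_none (by simpa using hq), if_neg (by tauto)]
      rfl
  · rw [List.getD_eq_getElem?_getD (i := p), List.getElem?_eq_none (by simpa using hp),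
      if_neg (by tauto)]
    rfl

lemma rotateA_eq_rotB (arr : List (List Int)) : rotateA arr = rotB arr := by
  apply grid_ext
  · rw [length_rotateA, length_rotB]
  · intro p
    by_cases hp : p < arr.length
    · rw [rowlen_rotateA _ _ hp, rowlen_rotB _ _ hp]
    · rw [List.getD_eq_getElem?_getD, List.getD_eq_getElem?_getD,
        List.getElem?_eq_none (by rw [length_rotateA]; omega),
        List.getElem?_eq_none (by rw [length_rotB]; omega)]
  · intro p q
    rw [get2d_rotateA, get2d_rotB]

lemma all_congr' {α : Type} (l : List α) (f g : α → Bool) (h : ∀ x ∈ l, f x = g x) :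
    l.all f = l.all g := by
  induction l with
  | nil => rfl
  | cons x xs ih =>
    simp only [List.all_cons]
    rw [h x List.mem_cons_self, ih (fun y hy => h y (List.mem_cons_of_mem x hy))]

lemma checkA_char (g : List (List Int)) (n : Nat) (hlen : g.length = 3 * n) :
    checkA g = (List.range n).all fun a => (List.range n).all fun b =>
      get2d g (n + a) (n + b) == 1 := by
  unfold checkA
  have h3 : g.length / 3 = n := by omega
  rw [h3, List.range'_eq_map_range, List.all_map]
  apply all_congr'
  intro a _
  simp only [Function.comp_apply]
  rw [List.all_map]
  rfl

-- the fit test at one offset: A's add-then-check equals B's direct check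

lemma fit_equiv (keyR lock : List (List Int)) (n m h w : Nat)
    (hm : m ≤ n + 1) (hh : h < n * 2) (hw : w < n * 2)
    (Big : List (List Int)) (HBlen : Big.length = 3 * n)
    (HBrow : ∀ p, p < Big.length → (Big.getD p []).length = 3 * n)
    (HB : ∀ p q, get2d Big p q =
      if n ≤ p ∧ p < n + n ∧ n ≤ q ∧ q < n + n then get2d lock (p - n) (q - n) else 0) :
    checkA (opFold (fun x v => x + v) keyR h w m m Big) = fitB keyR lock n m h w := by
  have hn : 0 < n := by omega
  have hsh := shape_opFold (fun x v => x + v) keyR h w m m Big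
  rw [checkA_char _ n (by rw [hsh.1]; exact HBlen)]
  unfold fitB
  apply all_congr'
  intro a ha
  apply all_congr'
  intro b hb
  rw [List.mem_range] at ha hb
  rw [get2d_opFold (fun x v => x + v) keyR h w m m Big (by omega)
      (fun p hp => by rw [HBrow p hp]; omega) (n + a) (n + b)]
  have hpa : n + a - n = a := by omega
  have hpb : n + b - n = b := by omega
  simp only []
  by_cases hc : h ≤ n + a ∧ n + a < h + m ∧ w ≤ n + b ∧ n + b < w + m
  · rw [if_pos hc, HB (n + a) (n + b), if_pos (by omega), hpa, hpb,
      if_pos (show (0 : Int) ≤ (n : Int) + a - h ∧ (n : Int) + a - h < m ∧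
        (0 : Int) ≤ (n : Int) + b - w ∧ (n : Int) + b - w < m from
        ⟨by omega, by omega, by omega, by omega⟩)]
    have e1 : ((n : Int) + a - h).toNat = n + a - h := by omega
    have e2 : ((n : Int) + b - w).toNat = n + b - w := by omega
    rw [e1, e2]
  · rw [if_neg hc, HB (n + a) (n + b), if_pos (by omega), hpa, hpb, if_neg (by omega), add_zero]

lemma restore (key : List (List Int)) (h w m : Nat) (Big : List (List Int))
    (hlen : h + m ≤ Big.length) (hrow : ∀ p, p < Big.length → w + m ≤ (Big.getD p []).length) :
    opFold (fun x v => x - v) key h w m m (opFold (fun x v => x + v) key h w m m Big) = Big := by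
  have hsh := shape_opFold (fun x v => x + v) key h w m m Big
  apply grid_ext
  · rw [(shape_opFold _ _ _ _ _ _ _).1, hsh.1]
  · intro p
    rw [(shape_opFold _ _ _ _ _ _ _).2, hsh.2]
  · intro p q
    rw [get2d_opFold _ _ _ _ _ _ _ (by omega) (fun p hp => by
        rw [hsh.2]; exact hrow p (by rwa [hsh.1] at hp)) p q]
    rw [get2d_opFold _ _ _ _ _ _ _ hlen hrow p q]
    by_cases hc : h ≤ p ∧ p < h + m ∧ w ≤ q ∧ q < w + m
    · rw [if_pos hc, if_pos hc]
      ring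
    · rw [if_neg hc, if_neg hc]

lemma wLoopA_eq (key lock : List (List Int)) (n m h : Nat)
    (hm : m ≤ n + 1) (hh : h < n * 2)
    (Big : List (List Int)) (HBlen : Big.length = 3 * n)
    (HBrow : ∀ p, p < Big.length → (Big.getD p []).length = 3 * n)
    (HB : ∀ p q, get2d Big p q =
      if n ≤ p ∧ p < n + n ∧ n ≤ q ∧ q < n + n then get2d lock (p - n) (q - n) else 0) :
    ∀ ws, (∀ w ∈ ws, w < n * 2) →
      (wLoopA key m h ws Big).1 = ws.any (fun w => fitB key lock n m h w) ∧
      ((wLoopA key m h ws Big).1 = false → (wLoopA key m h ws Big).2 = Big) := by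
  intro ws hws
  induction ws with
  | nil => exact ⟨rfl, fun _ => rfl⟩
  | cons w ws ih =>
    have hw : w < n * 2 := hws w List.mem_cons_self
    have hfit := fit_equiv key lock n m h w hm hh hw Big HBlen HBrow HB
    have hres : opFold (fun x v => x - v) key h w m m
        (opFold (fun x v => x + v) key h w m m Big) = Big :=
      restore key h w m Big (by omega) (fun p hp => by rw [HBrow p hp]; omega)
    simp only [wLoopA]
    by_cases hca : checkA (opFold (fun x v => x + v) key h w m m Big) = true
    · rw [if_pos hca, List.any_cons, ← hfit, hca]
      exact ⟨rfl, fun hfalse => by cases hfalse⟩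
    · rw [if_neg hca, hres]
      obtain ⟨ih1, ih2⟩ := ih (fun y hy => hws y (List.mem_cons_of_mem w hy))
      refine ⟨?_, ih2⟩
      rw [Bool.not_eq_true] at hca
      rw [List.any_cons, ih1, ← hfit, hca, Bool.false_or]

lemma hLoopA_eq (key lock : List (List Int)) (n m : Nat)
    (hm : m ≤ n + 1)
    (Big : List (List Int)) (HBlen : Big.length = 3 * n)
    (HBrow : ∀ p, p < Big.length → (Big.getD p []).length = 3 * n)
    (HB : ∀ p q, get2d Big p q =
      if n ≤ p ∧ p < n + n ∧ n ≤ q ∧ q < n + n then get2d lock (p - n) (q - n) else 0) :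
    ∀ hs, (∀ x ∈ hs, x < n * 2) →
      (hLoopA key n m hs Big).1
        = hs.any (fun h => (List.range (n * 2)).any fun w => fitB key lock n m h w) ∧
      ((hLoopA key n m hs Big).1 = false → (hLoopA key n m hs Big).2 = Big) := by
  intro hs hhs
  induction hs with
  | nil => exact ⟨rfl, fun _ => rfl⟩
  | cons h hs ih =>
    have hh : h < n * 2 := hhs h List.mem_cons_self
    obtain ⟨w1, w2⟩ := wLoopA_eq key lock n m h hm hh Big HBlen HBrow HB
      (List.range (n * 2)) (fun y hy => List.mem_range.mp hy)
    simp only [hLoopA]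
    by_cases hfound : (wLoopA key m h (List.range (n * 2)) Big).1 = true
    · rw [hfound] at w1
      rw [if_pos hfound]
      refine ⟨?_, fun hfalse => absurd hfalse (by rw [hfound]; simp)⟩
      rw [List.any_cons, ← w1, Bool.true_or, hfound]
    · rw [Bool.not_eq_true] at hfound
      rw [if_neg (by rw [hfound]; exact Bool.false_ne_true), w2 hfound]
      obtain ⟨ih1, ih2⟩ := ih (fun y hy => hhs y (List.mem_cons_of_mem h hy))
      refine ⟨?_, ih2⟩
      rw [List.any_cons, ih1, ← w1, hfound]
      simp

lemma rotLoop_eq (lock : List (List Int)) (n m : Nat) (hm : m ≤ n + 1)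
    (Big : List (List Int)) (HBlen : Big.length = 3 * n)
    (HBrow : ∀ p, p < Big.length → (Big.getD p []).length = 3 * n)
    (HB : ∀ p q, get2d Big p q =
      if n ≤ p ∧ p < n + n ∧ n ≤ q ∧ q < n + n then get2d lock (p - n) (q - n) else 0) :
    ∀ fuel key, rotLoopA n m fuel key Big = rotLoopB lock n m fuel key := by
  intro fuel
  induction fuel with
  | zero => intro key; rfl
  | succ f ih =>
    intro key
    simp only [rotLoopA, rotLoopB]
    rw [rotateA_eq_rotB]
    obtain ⟨h1, h2⟩ := hLoopA_eq (rotB key) lock n m hm Big HBlen HBrow HB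
      (List.range (n * 2)) (fun y hy => List.mem_range.mp hy)
    have h2n : n * 2 = 2 * n := Nat.mul_comm n 2
    by_cases hfound : (hLoopA (rotB key) n m (List.range (n * 2)) Big).1 = true
    · rw [if_pos hfound]
      rw [hfound] at h1
      rw [if_pos (by rw [← h2n, ← h1])]
    · rw [Bool.not_eq_true] at hfound
      rw [if_neg (by rw [hfound]; exact Bool.false_ne_true), h2 hfound, ih (rotB key)]
      rw [if_neg (by rw [← h2n, ← h1, hfound]; exact Bool.false_ne_true)]

lemma rotLoopA_zero (m : Nat) : ∀ fuel key g, rotLoopA 0 m fuel key g = false := by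
  intro fuel
  induction fuel with
  | zero => intro key g; rfl
  | succ f ih =>
    intro key g
    simp only [rotLoopA, Nat.zero_mul, List.range_zero, hLoopA]
    exact ih _ _

lemma rotLoopB_zero (lock : List (List Int)) (m : Nat) :
    ∀ fuel key, rotLoopB lock 0 m fuel key = false := by
  intro fuel
  induction fuel with
  | zero => intro key; rfl
  | succ f ih =>
    intro key
    simp only [rotLoopB, Nat.mul_zero, List.range_zero, List.any_nil, Bool.false_eq_true,
      if_false]
    exact ih _

lemma solution_agree (key lock : List (List Int)) (hpre : Pre_solution key lock) :
    solution key lock = solution_alt key lock := by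
  unfold Pre_solution at hpre
  unfold solution solution_alt
  rcases hpre.2.2 with hn | hm
  · rw [hn, rotLoopA_zero, rotLoopB_zero]
  · have hbig0len : (List.replicate (lock.length * 3)
        (List.replicate (lock.length * 3) (0 : Int))).length = lock.length * 3 :=
      List.length_replicate
    have hsh := shape_opFold (fun _ v => v) lock lock.length lock.length lock.length lock.length
      (List.replicate (lock.length * 3) (List.replicate (lock.length * 3) (0 : Int)))
    have HBlen : (opFold (fun _ v => v) lock lock.length lock.length lock.length lock.length
        (List.replicate (lock.length * 3) (List.replicate (lock.length * 3) (0 : Int)))).length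
        = 3 * lock.length := by
      rw [hsh.1, hbig0len]; ring
    have HBrow : ∀ p, p < (opFold (fun _ v => v) lock lock.length lock.length lock.length
        lock.length (List.replicate (lock.length * 3)
          (List.replicate (lock.length * 3) (0 : Int)))).length →
        ((opFold (fun _ v => v) lock lock.length lock.length lock.length lock.length
          (List.replicate (lock.length * 3) (List.replicate (lock.length * 3) (0 : Int)))).getD
            p []).length = 3 * lock.length := by
      intro p hp
      rw [hsh.1, hbig0len] at hp
      rw [hsh.2, rowlen_replicate _ _ _ hp]
      ring
    have HB : ∀ p q, get2d (opFold (fun _ v => v) lock lock.length lock.length lock.length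
        lock.length (List.replicate (lock.length * 3)
          (List.replicate (lock.length * 3) (0 : Int)))) p q =
        if lock.length ≤ p ∧ p < lock.length + lock.length ∧ lock.length ≤ q ∧
            q < lock.length + lock.length then get2d lock (p - lock.length) (q - lock.length)
        else 0 := by
      intro p q
      rw [get2d_opFold _ _ _ _ _ _ _ (by rw [hbig0len]; omega)
        (fun p hp => by
          rw [hbig0len] at hp
          rw [rowlen_replicate _ _ _ hp]; omega) p q]
      rw [get2d_replicate]
    exact rotLoop_eq lock lock.length key.length hm _ HBlen HBrow HB 4 key

-- ===== VERDICT (by name: the statement is the Claim_ definition above) =====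
theorem solution_spec : Claim_equal_solution := by
  intro key lock _ hpre
  unfold Spec_solution
  exact solution_agree key lock hpre
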